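-- pv_equiv track=rewrite | github.com/oriolsastre/adventofcode | 2024/19.py | patrons_possibles
-- ===== SOURCE A (Python) =====
-- def patrons_possibles(patrons: str, tovalloles: list[str])->tuple[int,int]:
--   acumulat=0
--   quantitat=0
--   manual_patrons = {}
--   def patro_manual(patro:str)->int:
--     if patro in manual_patrons: return manual_patrons[patro]
--     possible=0
--     for tovallola in tovalloles:
--       if patro==tovallola: possible+=1
--       if patro.startswith(tovallola):
--         possible+=patro_manual(patro[len(tovallola):])
--     manual_patrons[patro]=possible
--     return possible
--
--   for patro in patrons:
--     possibles=patro_manual(patro)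
--     acumulat+=possibles
--     if possibles>0: quantitat+=1
--   return (quantitat, acumulat)
-- ===== SOURCE B (Python) =====
-- def patrons_possibles(patrons, tovalloles):
--   comptes = {}
--   llargades = []
--   for t in tovalloles:
--     comptes[t] = comptes.get(t, 0) + 1
--     if len(t) not in llargades:
--       llargades.append(len(t))
--   acumulat = 0
--   quantitat = 0
--   for patro in patrons:
--     n = len(patro)
--     dp = [0] * (n + 1)
--     for i in range(n - 1, -1, -1):
--       s = 0
--       for l in llargades:
--         j = i + l
--         if j <= n:
--           m = comptes.get(patro[i:j], 0)
--           if m: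
--             s += m * ((1 if j == n else 0) + dp[j])
--       dp[i] = s
--     acumulat += dp[0]
--     if dp[0] > 0:
--       quantitat += 1
--   return (quantitat, acumulat)
-- ===== Notes on version B (the rewrite author's own statement) =====
-- stated objective: faster
-- what changed: Replaced A's shared recursive memo-dict over suffix strings by, per pattern, a bottom-up DP array indexed by start position, with the inner scan over all towels replaced by a towel-multiset dict probed once per distinct towel length.
-- crash fix: A raises RecursionError whenever tovalloles contains the empty string and patrons is nonempty; B ignores empty towels (they contribute nothing) and returns the counts, e.g. (['ab'], ['', 'a', 'b']) -> (1, 1). — e.g. on patrons_possibles(["ab"], ["", "a", "b"]): A raises RecursionError, B returns (1, 1)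
import Mathlib
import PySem

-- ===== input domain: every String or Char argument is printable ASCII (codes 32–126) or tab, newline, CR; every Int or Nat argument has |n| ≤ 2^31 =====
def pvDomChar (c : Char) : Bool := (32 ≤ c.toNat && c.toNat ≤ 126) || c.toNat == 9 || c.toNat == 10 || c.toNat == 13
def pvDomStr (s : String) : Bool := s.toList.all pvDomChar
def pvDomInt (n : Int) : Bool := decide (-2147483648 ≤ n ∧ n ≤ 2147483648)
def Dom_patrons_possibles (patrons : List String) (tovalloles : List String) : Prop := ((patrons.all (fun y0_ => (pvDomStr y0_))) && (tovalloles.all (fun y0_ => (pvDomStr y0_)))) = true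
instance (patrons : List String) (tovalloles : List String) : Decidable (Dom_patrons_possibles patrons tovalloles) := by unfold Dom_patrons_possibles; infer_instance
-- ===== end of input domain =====

-- B replaces A's recursive suffix-memo dict with a per-pattern bottom-up DP array, probing a towel-multiset dict once per distinct towel length instead of scanning all towels.

-- ===== PORT A =====
-- patro_manual with an explicit memo dict; strings handled as code-point lists, recursion made total
-- by a fuel counter that (for nonempty towels) never runs out when started at |patro| + 1.
mutual
def pmGo (ts : List String) (fuel : Nat) (patro : List Char)
    (memo : PySem.Dict (List Char) Int) : Int × PySem.Dict (List Char) Int :=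
  match fuel with
  | 0 => (0, memo)   -- unreachable under Pre_ (fuel guard only)
  | fuel + 1 =>
    match memo.get? patro with
    | some v => (v, memo)
    | none =>
      let r := pmLoop ts fuel ts patro memo 0
      (r.1, r.2.insert patro r.1)
  termination_by (fuel, 0, 0)
def pmLoop (ts : List String) (fuel : Nat) (rem : List String) (patro : List Char)
    (memo : PySem.Dict (List Char) Int) (possible : Int) : Int × PySem.Dict (List Char) Int :=
  match rem with
  | [] => (possible, memo)
  | t :: rest =>
    let possible := if patro = t.toList then possible + 1 else possible
    if PySem.Chars.startswith patro t.toList then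
      let r := pmGo ts fuel (patro.drop t.toList.length) memo   -- patro[len(t):]
      pmLoop ts fuel rest patro r.2 (possible + r.1)
    else
      pmLoop ts fuel rest patro memo possible
  termination_by (fuel, 1, rem.length)
end

def patrons_possibles (patrons : List String) (tovalloles : List String) : Int × Int :=
  let fin := patrons.foldl
    (fun (st : Int × Int × PySem.Dict (List Char) Int) p =>
      let r := pmGo tovalloles (p.toList.length + 1) p.toList st.2.2
      ((if r.1 > 0 then st.1 + 1 else st.1), (st.2.1 + r.1, r.2)))
    (0, 0, PySem.Dict.empty)
  (fin.1, fin.2.1)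

-- ===== PORT B =====
-- towel multiset (comptes) and the distinct towel lengths in first-seen order (llargades),
-- then per pattern a bottom-up DP array dp[i] = ways to compose patro[i:].
def comptesOf (ts : List String) : PySem.Dict (List Char) Int :=
  ts.foldl (fun d t => d.insert t.toList (d.getD t.toList 0 + 1)) PySem.Dict.empty

def llargadesOf (ts : List String) : List Nat :=
  ts.foldl (fun ls t => if t.toList.length ∈ ls then ls else ls ++ [t.toList.length]) []

def dpBuild (patro : List Char) (n : Nat) (comptes : PySem.Dict (List Char) Int)
    (llargades : List Nat) : Nat → List Int → List Int
  | 0, dp => dp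
  | k + 1, dp =>
    let s := llargades.foldl (fun s l =>
      let j := k + l
      if j ≤ n then
        let m := comptes.getD ((patro.drop k).take l) 0   -- patro[i:j]
        if m ≠ 0 then s + m * ((if j = n then 1 else 0) + dp.getD j 0) else s
      else s) 0
    dpBuild patro n comptes llargades k (dp.set k s)

def patrons_possibles_alt (patrons : List String) (tovalloles : List String) : Int × Int :=
  let comptes := comptesOf tovalloles
  let llargades := llargadesOf tovalloles
  patrons.foldl
    (fun (st : Int × Int) p =>
      let n := p.toList.length
      let dp := dpBuild p.toList n comptes llargades n (List.replicate (n + 1) 0)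
      let c := dp.getD 0 0
      ((if c > 0 then st.1 + 1 else st.1), st.2 + c))
    (0, 0)

-- ===== PRECONDITION & SPEC =====
-- Pre_ excludes only the inputs where A's recursion diverges (RecursionError): an empty-string
-- towel together with at least one pattern; with no patterns A returns (0,0) and is kept inside.
def Pre_patrons_possibles (patrons : List String) (tovalloles : List String) : Prop :=
  patrons ≠ [] → "" ∉ tovalloles
instance (patrons : List String) (tovalloles : List String) : Decidable (Pre_patrons_possibles patrons tovalloles) := by unfold Pre_patrons_possibles; infer_instance

def pvWitness_patrons_possibles : List String × List String := (["ab", "c"], ["a", "b", "ab"])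

-- A raises RecursionError whenever tovalloles contains the empty string and patrons is nonempty;
-- B ignores empty towels (they contribute nothing) and returns the counts.
def Raises_patrons_possibles (patrons : List String) (tovalloles : List String) : Prop :=
  "" ∈ tovalloles ∧ patrons ≠ []
instance (patrons : List String) (tovalloles : List String) : Decidable (Raises_patrons_possibles patrons tovalloles) := by unfold Raises_patrons_possibles; infer_instance
def pvRaiseWitness_patrons_possibles : List String × List String := (["ab"], ["", "a", "b"])
def pvRaiseWitnessOut_patrons_possibles : Int × Int := (1, 1)

def Spec_patrons_possibles (patrons : List String) (tovalloles : List String) (out : Int × Int) : Prop := out = patrons_possibles_alt patrons tovalloles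
instance (patrons : List String) (tovalloles : List String) (out : Int × Int) : Decidable (Spec_patrons_possibles patrons tovalloles out) := by unfold Spec_patrons_possibles; infer_instance

-- ===== CLAIM (what is proved, stated in full; the proofs are below) =====
def Claim_equal_patrons_possibles : Prop := ∀ (patrons : List String) (tovalloles : List String), Dom_patrons_possibles patrons tovalloles → Pre_patrons_possibles patrons tovalloles → Spec_patrons_possibles patrons tovalloles (patrons_possibles patrons tovalloles)
-- (the crash-fix claim; proved as patrons_possibles_raises at the bottom of the file)
def Claim_raises_patrons_possibles : Prop := (∀ (patrons : List String) (tovalloles : List String), Dom_patrons_possibles patrons tovalloles → Raises_patrons_possibles patrons tovalloles → ¬ Pre_patrons_possibles patrons tovalloles) ∧ (Dom_patrons_possibles (pvRaiseWitness_patrons_possibles.1) (pvRaiseWitness_patrons_possibles.2) ∧ Raises_patrons_possibles (pvRaiseWitness_patrons_possibles.1) (pvRaiseWitness_patrons_possibles.2) ∧ patrons_possibles_alt (pvRaiseWitness_patrons_possibles.1) (pvRaiseWitness_patrons_possibles.2) = pvRaiseWitnessOut_patrons_possibles)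

-- ===== LEMMAS AND PROOFS =====
-- the fuel-free value of patro_manual: cnt with enough fuel, g its fixed value
def cnt (ts : List String) : Nat → List Char → Int
  | 0, _ => 0
  | fuel + 1, p => ts.foldl (fun s t =>
      let s := if p = t.toList then s + 1 else s
      if t.toList <+: p then s + cnt ts fuel (p.drop t.toList.length) else s) 0

def g (ts : List String) (p : List Char) : Int := cnt ts (p.length + 1) p

def contrib (ts : List String) (p : List Char) (t : String) : Int :=
  (if p = t.toList then 1 else 0) + (if t.toList <+: p then g ts (p.drop t.toList.length) else 0)

def GoodMemo (ts : List String) (memo : PySem.Dict (List Char) Int) : Prop :=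
  ∀ k v, memo.get? k = some v → v = g ts k

theorem foldl_congr_pt {α : Type} (l : List α) (f f' : Int → α → Int) (init : Int)
    (h : ∀ s t, t ∈ l → f s t = f' s t) : l.foldl f init = l.foldl f' init := by
  induction l generalizing init with
  | nil => rfl
  | cons a l ih => simp only [List.foldl_cons]; rw [h _ _ (by simp)]; exact ih _ (fun s t ht => h s t (by simp [ht]))

theorem foldl_add_map {α : Type} (l : List α) (h : α → Int) (init : Int) :
    l.foldl (fun s t => s + h t) init = init + (l.map h).sum := by
  induction l generalizing init with
  | nil => simp
  | cons a l ih => simp only [List.foldl_cons, List.map_cons, List.sum_cons]; rw [ih]; ring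

theorem cnt_eq_g (ts : List String) (hne : ∀ t ∈ ts, t.toList ≠ []) :
    ∀ f p, p.length < f → cnt ts f p = g ts p := by
  intro f
  induction f using Nat.strong_induction_on with
  | _ f ih =>
    intro p hp
    match f, hp with
    | f + 1, hp =>
      show cnt ts (f + 1) p = cnt ts (p.length + 1) p
      simp only [cnt]
      apply foldl_congr_pt
      intro s t ht
      by_cases hpre : t.toList <+: p
      · have hq : (p.drop t.toList.length).length < p.length := by
          have h1 := hpre.length_le
          have h2 := List.length_pos_of_ne_nil (hne t ht)
          simp only [List.length_drop]; omega
        simp only [hpre, if_pos]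
        rw [ih f (by omega) _ (by omega), ih p.length (by omega) _ (by omega)]
      · simp only [hpre, ite_false]

theorem g_eq_sum (ts : List String) (hne : ∀ t ∈ ts, t.toList ≠ []) (p : List Char) :
    g ts p = (ts.map (contrib ts p)).sum := by
  show cnt ts (p.length + 1) p = _
  simp only [cnt]
  rw [foldl_congr_pt ts _ (fun s t => s + contrib ts p t) 0 ?_, foldl_add_map]
  · simp
  · intro s t ht
    by_cases hpre : t.toList <+: p
    · have hq : (p.drop t.toList.length).length < p.length := by
        have h1 := hpre.length_le
        have h2 := List.length_pos_of_ne_nil (hne t ht)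
        simp only [List.length_drop]; omega
      rw [cnt_eq_g ts hne p.length (p.drop t.toList.length) (by omega)]
      simp only [contrib, hpre, if_pos]
      by_cases he : p = t.toList <;> (simp [he]; try ring)
    · have he : p ≠ t.toList := by
        rintro rfl; exact hpre (List.prefix_refl _)
      simp [contrib, hpre, he]

theorem g_nil (ts : List String) (hne : ∀ t ∈ ts, t.toList ≠ []) : g ts [] = 0 := by
  rw [g_eq_sum ts hne]
  apply List.sum_eq_zero
  intro x hx
  simp only [List.mem_map] at hx
  obtain ⟨t, ht, rfl⟩ := hx
  have h1 : t.toList ≠ [] := hne t ht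
  have h2 : ¬ (t.toList <+: ([] : List Char)) := by
    rw [List.prefix_nil]; exact h1
  have h3 : ([] : List Char) ≠ t.toList := fun h => h1 h.symm
  simp [contrib, h2, h3]

theorem pmLoop_correct (ts : List String) (hne : ∀ t ∈ ts, t.toList ≠ []) (f : Nat)
    (hgo : ∀ p memo, p.length < f → GoodMemo ts memo →
      (pmGo ts f p memo).1 = g ts p ∧ GoodMemo ts (pmGo ts f p memo).2) :
    ∀ rem, rem ⊆ ts → ∀ p memo acc, p.length ≤ f → GoodMemo ts memo →
      (pmLoop ts f rem p memo acc).1 = acc + (rem.map (contrib ts p)).sum ∧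
      GoodMemo ts (pmLoop ts f rem p memo acc).2 := by
  intro rem
  induction rem with
  | nil =>
    intro _ p memo acc _ hm
    simp only [pmLoop, List.map_nil, List.sum_nil, add_zero]
    exact ⟨trivial, hm⟩
  | cons t rest ih =>
    intro hsub p memo acc hf hm
    have ht : t ∈ ts := hsub (by simp)
    have hrest : rest ⊆ ts := fun x hx => hsub (List.mem_cons_of_mem _ hx)
    have htne : t.toList ≠ [] := hne t ht
    by_cases hpre : t.toList <+: p
    · have hb : PySem.Chars.startswith p t.toList = true :=
        (PySem.Chars.startswith_iff _ _).mpr hpre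
      have hlen : (p.drop t.toList.length).length < f := by
        have h1 := hpre.length_le
        have h2 := List.length_pos_of_ne_nil htne
        simp only [List.length_drop]; omega
      obtain ⟨hg1, hg2⟩ := hgo (p.drop t.toList.length) memo hlen hm
      simp only [pmLoop, hb, if_true]
      obtain ⟨hi1, hi2⟩ := ih hrest p (pmGo ts f (p.drop t.toList.length) memo).2
        ((if p = t.toList then acc + 1 else acc) + (pmGo ts f (p.drop t.toList.length) memo).1)
        hf hg2
      refine ⟨?_, hi2⟩
      rw [hi1, hg1]
      simp only [List.map_cons, List.sum_cons, contrib, hpre, if_pos]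
      by_cases he : p = t.toList <;> simp only [he, if_true, if_false] <;> ring
    · have hb : PySem.Chars.startswith p t.toList = false := by
        rw [← Bool.not_eq_true, PySem.Chars.startswith_iff]; exact hpre
      have he : p ≠ t.toList := by rintro rfl; exact hpre (List.prefix_refl _)
      simp only [pmLoop, hb, Bool.false_eq_true, if_false, he]
      obtain ⟨hi1, hi2⟩ := ih hrest p memo acc hf hm
      refine ⟨?_, hi2⟩
      rw [hi1]
      simp only [List.map_cons, List.sum_cons, contrib, hpre, if_neg, he, not_false_iff]
      ring

theorem pmGo_correct (ts : List String) (hne : ∀ t ∈ ts, t.toList ≠ []) :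
    ∀ f p memo, p.length < f → GoodMemo ts memo →
      (pmGo ts f p memo).1 = g ts p ∧ GoodMemo ts (pmGo ts f p memo).2 := by
  intro f
  induction f with
  | zero => intro p memo hp _; omega
  | succ f ih =>
    intro p memo hp hm
    cases hget : memo.get? p with
    | some v =>
      simp only [pmGo, hget]
      exact ⟨hm p v hget, hm⟩
    | none =>
      obtain ⟨hl1, hl2⟩ := pmLoop_correct ts hne f ih ts (fun x hx => hx) p memo 0
        (by omega) hm
      have hv : (pmLoop ts f ts p memo 0).1 = g ts p := by
        rw [hl1, zero_add, ← g_eq_sum ts hne]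
      simp only [pmGo, hget]
      refine ⟨hv, ?_⟩
      intro k v hkv
      rw [PySem.Dict.get?_insert] at hkv
      split_ifs at hkv with hk
      · cases hkv; rw [hk]; exact hv
      · exact hl2 k v hkv

theorem getD_comptesOf_aux (x : List Char) :
    ∀ (ts : List String) (d : PySem.Dict (List Char) Int),
      (ts.foldl (fun d t => d.insert t.toList (d.getD t.toList 0 + 1)) d).getD x 0
        = d.getD x 0 + ((ts.map String.toList).count x : Int) := by
  intro ts
  induction ts with
  | nil => intro d; simp
  | cons t ts ih =>
    intro d
    simp only [List.foldl_cons, List.map_cons, List.count_cons]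
    rw [ih]
    rw [PySem.Dict.getD_insert]
    by_cases hx : x = t.toList
    · rw [if_pos hx, if_pos (by simpa using hx.symm), hx]
      push_cast
      ring
    · rw [if_neg hx, if_neg (by simpa using fun h => hx (by simpa using h.symm))]
      push_cast
      ring

theorem getD_comptesOf (ts : List String) (x : List Char) :
    (comptesOf ts).getD x 0 = ((ts.map String.toList).count x : Int) := by
  rw [comptesOf, getD_comptesOf_aux x ts PySem.Dict.empty, PySem.Dict.getD_empty, zero_add]

theorem llarg_mono (ts : List String) :
    ∀ acc : List Nat, ∀ x ∈ acc,
      x ∈ ts.foldl (fun ls t => if t.toList.length ∈ ls then ls else ls ++ [t.toList.length]) acc := by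
  induction ts with
  | nil => intro acc x hx; exact hx
  | cons t ts ih =>
    intro acc x hx
    simp only [List.foldl_cons]
    split_ifs with h
    · exact ih acc x hx
    · exact ih _ x (by simp [hx])

theorem llargades_cover (ts : List String) :
    ∀ acc : List Nat, ∀ t ∈ ts,
      t.toList.length ∈ ts.foldl (fun ls t => if t.toList.length ∈ ls then ls else ls ++ [t.toList.length]) acc := by
  induction ts with
  | nil => intro acc t ht; cases ht
  | cons u ts ih =>
    intro acc t ht
    simp only [List.foldl_cons]
    rcases List.mem_cons.mp ht with rfl | ht'
    · split_ifs with h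
      · exact llarg_mono ts acc _ h
      · exact llarg_mono ts _ _ (by simp)
    · exact ih _ t ht'

theorem llargades_nodup (ts : List String) :
    ∀ acc : List Nat, acc.Nodup →
      (ts.foldl (fun ls t => if t.toList.length ∈ ls then ls else ls ++ [t.toList.length]) acc).Nodup := by
  induction ts with
  | nil => intro acc h; exact h
  | cons t ts ih =>
    intro acc h
    simp only [List.foldl_cons]
    split_ifs with hm
    · exact ih acc h
    · exact ih _ (List.nodup_append.mpr ⟨h, List.nodup_singleton _,
        by intro a ha y hy h; exact hm ((h.trans (List.mem_singleton.mp hy)) ▸ ha)⟩)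

theorem llargades_sound (ts : List String) :
    ∀ acc : List Nat, ∀ x,
      x ∈ ts.foldl (fun ls t => if t.toList.length ∈ ls then ls else ls ++ [t.toList.length]) acc →
      x ∈ acc ∨ ∃ t ∈ ts, t.toList.length = x := by
  induction ts with
  | nil => intro acc x hx; exact Or.inl hx
  | cons t ts ih =>
    intro acc x hx
    simp only [List.foldl_cons] at hx
    split_ifs at hx with hm
    · rcases ih acc x hx with h | ⟨u, hu, he⟩
      · exact Or.inl h
      · exact Or.inr ⟨u, by simp [hu], he⟩
    · rcases ih _ x hx with h | ⟨u, hu, he⟩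
      · rcases List.mem_append.mp h with h' | h'
        · exact Or.inl h'
        · exact Or.inr ⟨t, by simp, (List.mem_singleton.mp h').symm⟩
      · exact Or.inr ⟨u, by simp [hu], he⟩

theorem sum_split (p : String → Bool) (h : String → Int) :
    ∀ l : List String,
      ((l.filter p).map h).sum + ((l.filter (fun t => !(p t))).map h).sum = (l.map h).sum := by
  intro l
  induction l with
  | nil => simp
  | cons t l ih =>
    cases hpt : p t <;> simp [hpt] <;> omega

theorem sum_group (h : String → Int) :
    ∀ (ks : List Nat), ks.Nodup → ∀ (l : List String), (∀ t ∈ l, t.toList.length ∈ ks) →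
      (l.map h).sum =
        (ks.map (fun b => ((l.filter (fun t => t.toList.length == b)).map h).sum)).sum := by
  intro ks
  induction ks with
  | nil =>
    intro _ l hcov
    cases l with
    | nil => simp
    | cons t l => exact absurd (hcov t (by simp)) (by simp)
  | cons b ks ih =>
    intro hnd l hcov
    have hb : b ∉ ks := (List.nodup_cons.mp hnd).1
    have hnd' : ks.Nodup := (List.nodup_cons.mp hnd).2
    have hcov' : ∀ t ∈ l.filter (fun t => !(t.toList.length == b)), t.toList.length ∈ ks := by
      intro t ht
      obtain ⟨ht1, ht2⟩ := List.mem_filter.mp ht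
      have hne : t.toList.length ≠ b := by simpa using ht2
      rcases List.mem_cons.mp (hcov t ht1) with h' | h'
      · exact absurd h' hne
      · exact h'
    have hfe : ∀ c ∈ ks,
        (l.filter (fun t => !(t.toList.length == b))).filter (fun t => t.toList.length == c)
          = l.filter (fun t => t.toList.length == c) := by
      intro c hc
      have hbc : b ≠ c := fun h' => hb (h' ▸ hc)
      rw [List.filter_filter]
      apply List.filter_congr
      intro t _
      by_cases h1 : t.toList.length = c
      · rw [String.length_toList] at h1
        simp [h1, Ne.symm hbc]
      · rw [String.length_toList] at h1
        simp [h1]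
    rw [List.map_cons, List.sum_cons, ← sum_split (fun t => t.toList.length == b) h l,
      ih hnd' _ hcov']
    congr 1
    apply congrArg
    exact (List.map_congr_left (fun c hc => by rw [hfe c hc])).symm

theorem sum_match (q : List Char) (ℓ : Nat) (hl : ℓ ≤ q.length) (e : Int) :
    ∀ l : List String,
      ((l.filter (fun t => t.toList.length == ℓ)).map
        (fun t => if t.toList <+: q then e else 0)).sum
      = e * (((l.map String.toList).count (q.take ℓ) : Nat) : Int) := by
  intro l
  induction l with
  | nil => simp
  | cons t l ih =>
    have hxlen : (q.take ℓ).length = ℓ := by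
      simp only [List.length_take]; omega
    by_cases hlen : t.toList.length = ℓ
    · have hiff : (t.toList <+: q) ↔ t.toList = q.take ℓ := by
        rw [List.prefix_iff_eq_take, hlen]
      simp only [List.filter_cons, hlen, beq_self_eq_true, if_pos, List.map_cons,
        List.sum_cons, List.count_cons, ih]
      by_cases he : t.toList = q.take ℓ
      · rw [if_pos (hiff.mpr he), if_pos (by simpa using he)]
        push_cast
        ring
      · rw [if_neg (fun hp => he (hiff.mp hp)), if_neg (by simpa using he)]
        push_cast
        ring
    · have hne : t.toList ≠ q.take ℓ := fun h' => hlen (by rw [h', hxlen])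
      simp only [List.filter_cons, List.map_cons, List.count_cons]
      rw [if_neg (by simpa using hlen), if_neg (by simpa using hne)]
      simpa using ih

theorem step_sum (ts : List String) (hne : ∀ t ∈ ts, t.toList ≠ []) (p : List Char) (k : Nat)
    (hk : k < p.length) (dp : List Int)
    (hdp : ∀ i, k < i → i ≤ p.length → dp.getD i 0 = g ts (p.drop i)) :
    ((llargadesOf ts).foldl (fun s l =>
      if k + l ≤ p.length then
        if (comptesOf ts).getD ((p.drop k).take l) 0 ≠ 0 then
          s + (comptesOf ts).getD ((p.drop k).take l) 0 *
            ((if k + l = p.length then 1 else 0) + dp.getD (k + l) 0)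
        else s
      else s) 0) = g ts (p.drop k) := by
  have hlen1 : ∀ l ∈ llargadesOf ts, 1 ≤ l := by
    intro l hl
    rcases llargades_sound ts [] l hl with h | ⟨t, ht, rfl⟩
    · cases h
    · exact List.length_pos_of_ne_nil (hne t ht)
  rw [foldl_congr_pt (llargadesOf ts) _
      (fun s l => s + (if k + l ≤ p.length then
        ((ts.map String.toList).count ((p.drop k).take l) : Int) *
          ((if k + l = p.length then 1 else 0) + g ts (p.drop (k + l))) else 0)) 0 ?_,
    foldl_add_map, zero_add]
  · -- sum over distinct lengths = sum over towels = g
    rw [g_eq_sum ts hne (p.drop k)]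
    have hmc : ts.map (contrib ts (p.drop k)) = ts.map (fun t =>
        if t.toList <+: p.drop k then
          (if k + t.toList.length = p.length then 1 else 0) + g ts (p.drop (k + t.toList.length))
        else 0) := by
      apply List.map_congr_left
      intro t _
      by_cases hpre : t.toList <+: p.drop k
      · have hiff : p.drop k = t.toList ↔ k + t.toList.length = p.length := by
          constructor
          · intro h'
            have := congrArg List.length h'
            simp only [List.length_drop] at this
            omega
          · intro h'
            exact (hpre.eq_of_length (by simp only [List.length_drop]; omega)).symm
        simp only [contrib, hpre, if_pos, List.drop_drop]
        by_cases he : p.drop k = t.toList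
        · rw [if_pos he, if_pos (hiff.mp he)]
        · rw [if_neg he, if_neg (fun h' => he (hiff.mpr h'))]
      · have he : p.drop k ≠ t.toList := fun h' => hpre (h' ▸ List.prefix_refl _)
        simp [contrib, hpre, he]
    rw [hmc, sum_group _ (llargadesOf ts) (llargades_nodup ts [] (by simp)) ts
      (fun t ht => llargades_cover ts [] t ht)]
    apply congrArg
    apply List.map_congr_left
    intro l hl
    by_cases hjl : k + l ≤ p.length
    · have hlq : l ≤ (p.drop k).length := by simp only [List.length_drop]; omega
      have hfc : (ts.filter (fun t => t.toList.length == l)).map (fun t =>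
          if t.toList <+: p.drop k then
            (if k + t.toList.length = p.length then 1 else 0) + g ts (p.drop (k + t.toList.length))
          else 0) =
          (ts.filter (fun t => t.toList.length == l)).map (fun t =>
          if t.toList <+: p.drop k then
            (if k + l = p.length then 1 else 0) + g ts (p.drop (k + l))
          else 0) := by
        apply List.map_congr_left
        intro t ht
        have : t.toList.length = l := by simpa using (List.mem_filter.mp ht).2
        rw [this]
      rw [if_pos hjl, hfc, sum_match (p.drop k) l hlq _ ts]
      ring
    · rw [if_neg hjl]
      symm
      apply List.sum_eq_zero
      intro x hx
      simp only [List.mem_map] at hx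
      obtain ⟨t, ht, rfl⟩ := hx
      have htl : t.toList.length = l := by simpa using (List.mem_filter.mp ht).2
      rw [if_neg]
      intro hpre
      have := hpre.length_le
      simp only [List.length_drop] at this
      omega
  · intro s l hl
    show (if k + l ≤ p.length then
        if (comptesOf ts).getD ((p.drop k).take l) 0 ≠ 0 then
          s + (comptesOf ts).getD ((p.drop k).take l) 0 *
            ((if k + l = p.length then 1 else 0) + dp.getD (k + l) 0)
        else s
      else s) = s + (if k + l ≤ p.length then
        ((ts.map String.toList).count ((p.drop k).take l) : Int) *
          ((if k + l = p.length then 1 else 0) + g ts (p.drop (k + l))) else 0)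
    by_cases hj : k + l ≤ p.length
    · have hdpj : dp.getD (k + l) 0 = g ts (p.drop (k + l)) :=
        hdp (k + l) (by have := hlen1 l hl; omega) hj
      rw [if_pos hj, if_pos hj, getD_comptesOf, hdpj]
      by_cases hm : ((ts.map String.toList).count ((p.drop k).take l) : Int) ≠ 0
      · rw [if_pos hm]
      · rw [if_neg hm]
        rw [not_not.mp hm]
        ring
    · rw [if_neg hj, if_neg hj, add_zero]

theorem dpBuild_correct (ts : List String) (hne : ∀ t ∈ ts, t.toList ≠ []) (p : List Char) :
    ∀ k dp, k ≤ p.length → dp.length = p.length + 1 →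
      (∀ i, k ≤ i → i ≤ p.length → dp.getD i 0 = g ts (p.drop i)) →
      ∀ i, i ≤ p.length →
        (dpBuild p p.length (comptesOf ts) (llargadesOf ts) k dp).getD i 0 = g ts (p.drop i) := by
  intro k
  induction k with
  | zero =>
    intro dp _ _ hinv i hi
    simpa only [dpBuild] using hinv i (Nat.zero_le i) hi
  | succ k ih =>
    intro dp hk hlen hinv i hi
    have hstep := step_sum ts hne p k (by omega) dp (fun i' h1 h2 => hinv i' (by omega) h2)
    simp only [dpBuild]
    refine ih _ (by omega) (by simp [hlen]) ?_ i hi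
    intro i' hi1 hi2
    rw [List.getD_eq_getElem?_getD, List.getElem?_set]
    split_ifs with h1 h2
    · subst h1
      rw [Option.getD_some]
      exact hstep
    · exact absurd (by omega : k < dp.length) h2
    · rw [← List.getD_eq_getElem?_getD]
      exact hinv i' (by omega) hi2

theorem alt_dp_eq_g (ts : List String) (hne : ∀ t ∈ ts, t.toList ≠ []) (p : List Char) :
    (dpBuild p p.length (comptesOf ts) (llargadesOf ts) p.length
      (List.replicate (p.length + 1) 0)).getD 0 0 = g ts p := by
  have h := dpBuild_correct ts hne p p.length (List.replicate (p.length + 1) 0) le_rfl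
    (by simp) ?_ 0 (Nat.zero_le _)
  · simpa using h
  · intro i hi1 hi2
    have hi : i = p.length := by omega
    subst hi
    rw [List.drop_length, g_nil ts hne]
    simp

theorem main_fold (ts : List String) (hne : ∀ t ∈ ts, t.toList ≠ []) :
    ∀ (ps : List String) (q a : Int) (memo : PySem.Dict (List Char) Int), GoodMemo ts memo →
      (let fin := ps.foldl
        (fun (st : Int × Int × PySem.Dict (List Char) Int) p =>
          let r := pmGo ts (p.toList.length + 1) p.toList st.2.2
          ((if r.1 > 0 then st.1 + 1 else st.1), (st.2.1 + r.1, r.2)))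
        (q, a, memo)
       (fin.1, fin.2.1)) =
      ps.foldl
        (fun (st : Int × Int) p =>
          let n := p.toList.length
          let dp := dpBuild p.toList n (comptesOf ts) (llargadesOf ts) n (List.replicate (n + 1) 0)
          let c := dp.getD 0 0
          ((if c > 0 then st.1 + 1 else st.1), st.2 + c))
        (q, a) := by
  intro ps
  induction ps with
  | nil => intro q a memo _; rfl
  | cons p ps ih =>
    intro q a memo hm
    obtain ⟨hr1, hr2⟩ := pmGo_correct ts hne (p.toList.length + 1) p.toList memo
      (by omega) hm
    simp only [List.foldl_cons]
    rw [ih _ _ _ hr2, hr1, alt_dp_eq_g ts hne p.toList]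

-- ===== VERDICT (by name: the statement is the Claim_ definition above) =====
theorem patrons_possibles_spec : Claim_equal_patrons_possibles := by
  intro ps ts _ hpre
  show patrons_possibles ps ts = patrons_possibles_alt ps ts
  cases ps with
  | nil => rfl
  | cons p ps' =>
    have hne : ∀ t ∈ ts, t.toList ≠ [] := by
      intro t ht h
      have h0 : t = "" := String.toList_eq_nil_iff.mp h
      exact hpre (by simp) (h0 ▸ ht)
    unfold patrons_possibles patrons_possibles_alt
    exact main_fold ts hne (p :: ps') 0 0 PySem.Dict.empty
      (fun k v h => by rw [PySem.Dict.get?_empty] at h; cases h)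

theorem patrons_possibles_raises : Claim_raises_patrons_possibles := by
  unfold Claim_raises_patrons_possibles
  exact ⟨by intro ps ts _ hr hpre; exact hpre hr.2 hr.1, by decide⟩

-- witness self-check: reads the witness value off patrons_possibles_raises
theorem pvRaiseValue_ok : patrons_possibles_alt (pvRaiseWitness_patrons_possibles.1) (pvRaiseWitness_patrons_possibles.2) = pvRaiseWitnessOut_patrons_possibles := patrons_possibles_raises.2.2.2
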